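-- pv_equiv track=rewrite | github.com/rohithkodali/sppas | sppas/src/presenters/tierstats.py | __tuple_to_dict
-- ===== SOURCE A (Python) =====
-- def __tuple_to_dict(items):
--     """
--     Convert into a dictionary.
--     @param items (tuple) the ngram items
--     @return: dictionary key=text, value=list of durations.
--     """
--     d = {}
--     for item in items:
--         dur = sum([i[1] for i in item])
--         text = " ".join([i[0] for i in item])
--         if not text in d:
--             d[text] = []
--         d[text].append(dur)
--     return d
-- ===== SOURCE B (Python) =====
-- def __tuple_to_dict(items):
--     """
--     Convert into a dictionary.
--     @param items (tuple) the ngram items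
--     @return: dictionary key=text, value=list of durations.
--     """
--     pairs = [(" ".join(w for w, _ in item), sum(n for _, n in item)) for item in items]
--     order = list(dict.fromkeys(t for t, _ in pairs))
--     return {t: [dur for text, dur in pairs if text == t] for t in order}
-- ===== Notes on version B (the rewrite author's own statement) =====
-- stated objective: alternative
-- what changed: Replaces A's incremental dict building (membership test, insert-empty, append per item) with a declarative two-phase grouping: flatten every item to a (text, duration) pair, dedup the texts in first-occurrence order, then build each group by filtering the flat pair list.
import Mathlib
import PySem

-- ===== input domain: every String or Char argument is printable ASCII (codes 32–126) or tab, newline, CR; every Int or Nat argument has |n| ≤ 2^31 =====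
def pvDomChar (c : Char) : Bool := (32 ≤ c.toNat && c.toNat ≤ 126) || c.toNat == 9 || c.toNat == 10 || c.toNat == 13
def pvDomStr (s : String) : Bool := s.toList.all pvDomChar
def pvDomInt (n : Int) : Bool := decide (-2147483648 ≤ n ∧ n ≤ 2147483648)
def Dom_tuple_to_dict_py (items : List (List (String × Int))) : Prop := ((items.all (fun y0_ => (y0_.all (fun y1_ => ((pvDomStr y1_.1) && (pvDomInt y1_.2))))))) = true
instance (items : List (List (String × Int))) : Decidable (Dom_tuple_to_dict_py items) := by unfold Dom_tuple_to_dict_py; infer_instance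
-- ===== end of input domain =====

-- B replaces A's incremental dict building with a flat (text, duration) pair list, an ordered
-- dedup of the texts, and a filter per distinct text (alternative decomposition, not faster).

-- ===== PORT A =====
def tuple_to_dict_py (items : List (List (String × Int))) : List (String × List Int) :=
  (items.foldl (fun d item =>
      let dur : Int := (item.map (fun i => i.2)).sum
      let text : String := PySem.Str.join " " (item.map (fun i => i.1))
      let d := if d.contains text then d else d.insert text ([] : List Int)
      d.modify text [] (fun l => l ++ [dur]))
    PySem.Dict.empty).items

-- ===== PORT B =====
def tuple_to_dict_py_alt (items : List (List (String × Int))) : List (String × List Int) :=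
  let pairs := items.map (fun item =>
    (PySem.Str.join " " (item.map (fun i => i.1)), (item.map (fun i => i.2)).sum))
  (PySem.List.dedup (pairs.map (fun p => p.1))).map
    (fun t => (t, (pairs.filter (fun p => p.1 == t)).map (fun p => p.2)))

-- ===== PRECONDITION & SPEC =====
def Spec_tuple_to_dict_py (items : List (List (String × Int))) (out : List (String × List Int)) : Prop := out = tuple_to_dict_py_alt items
instance (items : List (List (String × Int))) (out : List (String × List Int)) : Decidable (Spec_tuple_to_dict_py items out) := by unfold Spec_tuple_to_dict_py; infer_instance

-- ===== CLAIM (what is proved, stated in full; the proofs are below) =====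
def Claim_equal_tuple_to_dict_py : Prop := ∀ (items : List (List (String × Int))), Dom_tuple_to_dict_py items → Spec_tuple_to_dict_py items (tuple_to_dict_py items)

-- ===== LEMMAS AND PROOFS =====

-- A's loop body, expressed on a flat (text, duration) pair.
def pvStep (d : PySem.Dict String (List Int)) (p : String × Int) : PySem.Dict String (List Int) :=
  (if d.contains p.1 then d else d.insert p.1 ([] : List Int)).modify p.1 [] (fun l => l ++ [p.2])

-- B's grouping, as a function of the flat pair list.
def pvGroup (ps : List (String × Int)) : List (String × List Int) :=
  (PySem.List.dedup (ps.map (fun p => p.1))).map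
    (fun t => (t, (ps.filter (fun p => p.1 == t)).map (fun p => p.2)))

lemma pvFind_map_diag (L : List String) (F : String → List Int) (t : String) :
    (L.map (fun x => (x, F x))).find? (fun p => p.1 == t)
      = if t ∈ L then some (t, F t) else none := by
  induction L with
  | nil => simp
  | cons x xs ih =>
    by_cases hx : x = t
    · subst hx; simp
    · simp [hx, Ne.symm hx, ih]

lemma pvAny_map_diag (L : List String) (F : String → List Int) (t : String) :
    ((L.map (fun x => (x, F x))).any (fun p => p.1 == t)) = decide (t ∈ L) := by
  induction L with
  | nil => simp
  | cons x xs ih =>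
    simp only [List.map_cons, List.any_cons, ih, List.mem_cons]
    by_cases hx : x = t
    · subst hx; simp
    · simp [hx, Ne.symm hx]

lemma pvDedup_snoc {α : Type} [BEq α] [LawfulBEq α] (xs : List α) (x : α) :
    PySem.List.dedup (xs ++ [x])
      = if x ∈ xs then PySem.List.dedup xs else PySem.List.dedup xs ++ [x] := by
  rw [PySem.List.dedup_eq_ofList, PySem.List.dedup_eq_ofList, PySem.Set.ofList_eq_foldl,
    List.foldl_append, List.foldl_cons, List.foldl_nil, ← PySem.Set.ofList_eq_foldl]
  by_cases hx : x ∈ xs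
  · have h : (PySem.Set.ofList xs).contains x = true :=
      (PySem.Set.contains_iff _ _).2 ((PySem.Set.mem_ofList xs x).2 hx)
    simp [PySem.Set.add]
  · have h : ¬ (PySem.Set.ofList xs).contains x = true := fun hc =>
      hx ((PySem.Set.mem_ofList xs x).1 ((PySem.Set.contains_iff _ _).1 hc))
    simp [PySem.Set.add]

lemma pvInsert_items_pos {κ ν : Type} [BEq κ] (d : PySem.Dict κ ν) (k : κ) (v : ν)
    (h : d.contains k = true) :
    (d.insert k v).items = d.items.map (fun p => if p.1 == k then (k, v) else p) := by
  unfold PySem.Dict.insert; rw [h]; simp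

lemma pvInsert_items_neg {κ ν : Type} [BEq κ] (d : PySem.Dict κ ν) (k : κ) (v : ν)
    (h : ¬ d.contains k = true) :
    (d.insert k v).items = d.items ++ [(k, v)] := by
  unfold PySem.Dict.insert; rw [if_neg h]

lemma pvMain (ps : List (String × Int)) :
    (ps.foldl pvStep PySem.Dict.empty).items = pvGroup ps := by
  induction ps using List.reverseRecOn with
  | nil => simp [pvGroup, PySem.List.dedup, PySem.Set.ofList_eq_foldl, PySem.Dict.empty]
  | append_singleton ps p ih =>
    obtain ⟨t, v⟩ := p
    rw [List.foldl_append, List.foldl_cons, List.foldl_nil]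
    set d := ps.foldl pvStep PySem.Dict.empty with hd
    have hmd : ∀ s : String, s ∈ PySem.List.dedup (ps.map (fun p => p.1)) ↔
        s ∈ ps.map (fun p => p.1) := by
      intro s; rw [PySem.List.dedup_eq_ofList]; exact PySem.Set.mem_ofList _ _
    have hcont : d.contains t = decide (t ∈ ps.map (fun p => p.1)) := by
      show (d.items.any (fun p => p.1 == t)) = _
      rw [ih]; unfold pvGroup at *
      rw [pvAny_map_diag]
      by_cases ht : t ∈ ps.map (fun p => p.1) <;> simp [ht]
    have hget : d.get? t = if t ∈ ps.map (fun p => p.1)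
        then some ((ps.filter (fun p => p.1 == t)).map (fun p => p.2)) else none := by
      show (d.items.find? (fun p => p.1 == t)).map (fun x => x.2) = _
      rw [ih]; unfold pvGroup
      rw [pvFind_map_diag]
      by_cases ht : t ∈ ps.map (fun p => p.1) <;> simp [ht]
    by_cases ht : t ∈ ps.map (fun p => p.1)
    · -- existing key: d is unchanged, then the value list gets [v] appended in place
      have h1 : pvStep d (t, v) =
          d.insert t ((ps.filter (fun p => p.1 == t)).map (fun p => p.2) ++ [v]) := by
        unfold pvStep PySem.Dict.modify
        rw [hcont]; simp only [ht, decide_true, if_true]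
        unfold PySem.Dict.getD
        rw [hget]; simp [ht]
      rw [h1, pvInsert_items_pos _ _ _ (by rw [hcont]; simp [ht])]
      rw [ih]; unfold pvGroup
      rw [List.map_map]
      rw [show (ps ++ [(t, v)]).map (fun p => p.1) = ps.map (fun p => p.1) ++ [t] by simp]
      rw [pvDedup_snoc _ _]
      simp only [ht, if_true]
      apply List.map_congr_left
      intro t' ht'
      by_cases h : t' = t
      · subst h; simp [List.filter_append]
      · simp [Function.comp, h, Ne.symm h, List.filter_append]
    · -- new key: an empty list is inserted at the end, then [v] appended to it
      have h1 : pvStep d (t, v) = (d.insert t ([] : List Int)).insert t [v] := by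
        unfold pvStep PySem.Dict.modify
        rw [hcont]; simp only [ht, decide_false, Bool.false_eq_true, if_false]
        unfold PySem.Dict.getD
        rw [PySem.Dict.get?_insert_self]
        rfl
      rw [h1]
      have h2 : (d.insert t ([] : List Int)).items = d.items ++ [(t, ([] : List Int))] :=
        pvInsert_items_neg _ _ _ (by rw [hcont]; simp [ht])
      have h3 : ((d.insert t ([] : List Int)).insert t [v]).items
          = (d.insert t ([] : List Int)).items.map
              (fun p => if p.1 == t then (t, ([v] : List Int)) else p) :=
        pvInsert_items_pos _ _ _ (by
          show ((d.insert t ([] : List Int)).items.any (fun p => p.1 == t)) = true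
          rw [h2]; simp)
      rw [h3, h2, ih]; unfold pvGroup
      rw [show (ps ++ [(t, v)]).map (fun p => p.1) = ps.map (fun p => p.1) ++ [t] by simp]
      rw [pvDedup_snoc _ _]
      simp only [ht, if_false]
      rw [List.map_append, List.map_map, List.map_append]
      congr 1
      · apply List.map_congr_left
        intro t' ht'
        have h : t' ≠ t := fun h => ht (h ▸ (hmd t').1 ht')
        simp [Function.comp, h, List.filter_append, Ne.symm h]
      · have hnil : ps.filter (fun p => p.1 == t) = [] := by
          rw [List.filter_eq_nil_iff]
          intro p hp hbeq
          exact ht (List.mem_map.2 ⟨p, hp, by simpa using hbeq⟩)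
        simp [List.filter_append, hnil]

-- ===== VERDICT (by name: the statement is the Claim_ definition above) =====
theorem tuple_to_dict_py_spec : Claim_equal_tuple_to_dict_py := by
  intro items _
  show tuple_to_dict_py items = tuple_to_dict_py_alt items
  unfold tuple_to_dict_py tuple_to_dict_py_alt
  rw [show (items.foldl (fun d item =>
      let dur : Int := (item.map (fun i => i.2)).sum
      let text : String := PySem.Str.join " " (item.map (fun i => i.1))
      let d := if d.contains text then d else d.insert text ([] : List Int)
      d.modify text [] (fun l => l ++ [dur])) PySem.Dict.empty)
    = ((items.map (fun item =>
        (PySem.Str.join " " (item.map (fun i => i.1)), (item.map (fun i => i.2)).sum))).foldl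
        pvStep PySem.Dict.empty) from by
      rw [List.foldl_map]; rfl]
  exact pvMain _
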